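-- pv_equiv track=rewrite | github.com/sylvzzz/42_Piscine_Python | PyM3/ex5/ft_data_stream.py | process_streams
-- ===== SOURCE A (Python) =====
-- def game_event_stream(count: int):
--     players = [
--         ("alice", 5), ("bob", 12), ("charlie", 8), ("dana", 15),
--         ("eva", 3), ("frank", 20), ("gina", 9)
--     ]
--     actions = ["killed monster", "found treasure", "leveled up"]
--
--     for i in range(count):
--         name, level = players[i % len(players)]
--         action = actions[i % len(actions)]
--
--         yield {
--             "player": name,
--             "level": level,
--             "action": action
--         }
--
-- def process_streams(count: int) -> tuple:
--     stream = game_event_stream(count)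
--     total = 0
--     high_level = 0
--     treasure = 0
--     level_up = 0
--     samples = []
--
--     for event in stream:
--         total += 1
--         lvl = event["level"]
--         act = event["action"]
--
--         if lvl >= 10:
--             high_level += 1
--         if act == "found treasure":
--             treasure += 1
--         if act == "leveled up":
--             level_up += 1
--
--         if len(samples) < 3:
--             samples.append(
--                 f"Event {total}: Player {event['player']} "
--                 f"(level {lvl}) {act}"
--             )
--
--     stats = {
--         "total": total,
--         "high_level": high_level,
--         "treasure": treasure,
--         "level_up": level_up,
--     }
--     return stats, samples
-- ===== SOURCE B (Python) =====
-- def process_streams(count: int) -> tuple: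
--     players = [("alice", 5), ("bob", 12), ("charlie", 8), ("dana", 15),
--                ("eva", 3), ("frank", 20), ("gina", 9)]
--     actions = ["killed monster", "found treasure", "leveled up"]
--     n = max(count, 0)
--     stats = {
--         "total": n,
--         "high_level": 3 * (n // 7) + (n % 7) // 2,  # high-level players sit at indices 1,3,5 of each 7-cycle
--         "treasure": (n + 1) // 3,                   # i % 3 == 1
--         "level_up": n // 3,                         # i % 3 == 2
--     }
--     samples = [
--         f"Event {i + 1}: Player {players[i][0]} (level {players[i][1]}) {actions[i]}"
--         for i in range(min(n, 3))
--     ]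
--     return stats, samples
-- ===== Notes on version B (the rewrite author's own statement) =====
-- stated objective: faster
-- what changed: B replaces A's per-event simulation loop with closed-form modular arithmetic over the periodic player and action cycles and builds the sample lines directly from the first events, so no stream is generated at all.
import Mathlib
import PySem

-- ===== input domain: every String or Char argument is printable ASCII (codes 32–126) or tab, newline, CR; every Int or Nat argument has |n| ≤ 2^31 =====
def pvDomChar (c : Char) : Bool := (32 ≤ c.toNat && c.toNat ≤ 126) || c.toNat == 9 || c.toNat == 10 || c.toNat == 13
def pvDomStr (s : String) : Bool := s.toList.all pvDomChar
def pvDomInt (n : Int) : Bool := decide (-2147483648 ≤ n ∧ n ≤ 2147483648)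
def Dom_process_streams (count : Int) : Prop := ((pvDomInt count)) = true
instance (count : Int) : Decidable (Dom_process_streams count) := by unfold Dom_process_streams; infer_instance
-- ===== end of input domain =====

-- B replaces A's O(count) loop over the generated event stream with closed-form counting
-- over the 7- and 3-cycles plus the three first samples computed directly (objective: faster).

-- ===== PORT A =====
def aPlayers : List (String × Int) :=
  [("alice", 5), ("bob", 12), ("charlie", 8), ("dana", 15), ("eva", 3), ("frank", 20), ("gina", 9)]

def aActions : List String := ["killed monster", "found treasure", "leveled up"]

-- one iteration of A's for-loop over the generator's events (event i of game_event_stream)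
def aStep (st : Int × Int × Int × Int × List String) (i : Int) : Int × Int × Int × Int × List String :=
  match st with
  | (total, high_level, treasure, level_up, samples) =>
    let p := PySem.List.pyGetD aPlayers (PySem.Int.mod i (PySem.List.len aPlayers)) ("", 0)
    let act := PySem.List.pyGetD aActions (PySem.Int.mod i (PySem.List.len aActions)) ""
    let total := total + 1
    let lvl := p.2
    let high_level := if 10 ≤ lvl then high_level + 1 else high_level
    let treasure := if act = "found treasure" then treasure + 1 else treasure
    let level_up := if act = "leveled up" then level_up + 1 else level_up
    let samples :=
      if samples.length < 3 then
        samples ++ ["Event " ++ PySem.Int.toStr total ++ ": Player " ++ p.1 ++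
                    " (level " ++ PySem.Int.toStr lvl ++ ") " ++ act]
      else samples
    (total, high_level, treasure, level_up, samples)

def process_streams (count : Int) : (List (String × Int)) × List String :=
  let fin := (PySem.List.pyRange 0 count 1).foldl aStep (0, 0, 0, 0, [])
  ([("total", fin.1), ("high_level", fin.2.1), ("treasure", fin.2.2.1), ("level_up", fin.2.2.2.1)],
   fin.2.2.2.2)

-- ===== PORT B =====
def bPlayers : List (String × Int) :=
  [("alice", 5), ("bob", 12), ("charlie", 8), ("dana", 15), ("eva", 3), ("frank", 20), ("gina", 9)]

def bActions : List String := ["killed monster", "found treasure", "leveled up"]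

def process_streams_alt (count : Int) : (List (String × Int)) × List String :=
  let n := max count 0
  ([("total", n),
    ("high_level", 3 * PySem.Int.floordiv n 7 + PySem.Int.floordiv (PySem.Int.mod n 7) 2),
    ("treasure", PySem.Int.floordiv (n + 1) 3),
    ("level_up", PySem.Int.floordiv n 3)],
   (PySem.List.pyRange 0 (min n 3) 1).map (fun i =>
     "Event " ++ PySem.Int.toStr (i + 1) ++ ": Player " ++ (PySem.List.pyGetD bPlayers i ("", 0)).1 ++
     " (level " ++ PySem.Int.toStr ((PySem.List.pyGetD bPlayers i ("", 0)).2) ++ ") " ++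
     PySem.List.pyGetD bActions i ""))

-- ===== PRECONDITION & SPEC =====
def Spec_process_streams (count : Int) (out : (List (String × Int)) × List String) : Prop := out = process_streams_alt count
instance (count : Int) (out : (List (String × Int)) × List String) : Decidable (Spec_process_streams count out) := by unfold Spec_process_streams; infer_instance

-- ===== CLAIM (what is proved, stated in full; the proofs are below) =====
def Claim_equal_process_streams : Prop := ∀ (count : Int), Dom_process_streams count → Spec_process_streams count (process_streams count)

-- ===== LEMMAS AND PROOFS =====

def sampleLit : List String :=
  ["Event 1: Player alice (level 5) killed monster",
   "Event 2: Player bob (level 12) found treasure",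
   "Event 3: Player charlie (level 8) leveled up"]

theorem loop_closed (m : Nat) :
    (PySem.List.pyRange 0 (m : Int) 1).foldl aStep (0, 0, 0, 0, []) =
      ((m : Int), ((3 * (m / 7) + (m % 7) / 2 : Nat) : Int), (((m + 1) / 3 : Nat) : Int),
        ((m / 3 : Nat) : Int), sampleLit.take m) := by
  induction m with
  | zero => simp
  | succ m ih =>
    have hcast : ((m + 1 : Nat) : Int) = (m : Int) + 1 := by push_cast; ring
    rw [hcast, PySem.List.pyRange_one_succ_right (by positivity : (0:Int) ≤ (m:Int)), List.foldl_append, ih]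
    have hm7 : ((m : Int)) % 7 = ((m % 7 : Nat) : Int) := by omega
    have hm3 : ((m : Int)) % 3 = ((m % 3 : Nat) : Int) := by omega
    simp only [List.foldl_cons, List.foldl_nil, aStep, PySem.List.len_eq, aPlayers, aActions, List.length_cons, List.length_nil,
      aPlayers, aActions]
    simp only [show ((0+1+1+1+1+1+1+1 : Nat) : Int) = 7 from by norm_num,
        show ((0+1+1+1 : Nat) : Int) = 3 from by norm_num,
        PySem.Int.mod_eq_emod_of_pos (by norm_num : (0:Int) < 7),
        PySem.Int.mod_eq_emod_of_pos (by norm_num : (0:Int) < 3)]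
    rw [Prod.mk.injEq, Prod.mk.injEq, Prod.mk.injEq, Prod.mk.injEq]
    refine ⟨rfl, ?_, ?_, ?_, ?_⟩
    · -- high_level
      have h7 : m % 7 = 0 ∨ m % 7 = 1 ∨ m % 7 = 2 ∨ m % 7 = 3 ∨ m % 7 = 4 ∨ m % 7 = 5 ∨ m % 7 = 6 := by omega
      rcases h7 with h | h | h | h | h | h | h <;>
        rw [show ((m:Int)) % 7 = ((m % 7 : Nat) : Int) by omega, h] <;>
        norm_num [PySem.List.pyGetD, show (Int.toNat 0)=0 from rfl, show (Int.toNat 1)=1 from rfl, show (Int.toNat 2)=2 from rfl, show (Int.toNat 3)=3 from rfl, show (Int.toNat 4)=4 from rfl, show (Int.toNat 5)=5 from rfl, show (Int.toNat 6)=6 from rfl, List.getElem_cons_succ, List.getElem_cons_zero] <;> omega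
    · -- treasure
      have h3 : m % 3 = 0 ∨ m % 3 = 1 ∨ m % 3 = 2 := by omega
      rcases h3 with h | h | h <;>
        rw [show ((m:Int)) % 3 = ((m % 3 : Nat) : Int) by omega, h] <;>
        norm_num [PySem.List.pyGetD, show (Int.toNat 0)=0 from rfl, show (Int.toNat 1)=1 from rfl, show (Int.toNat 2)=2 from rfl, show (Int.toNat 3)=3 from rfl, show (Int.toNat 4)=4 from rfl, show (Int.toNat 5)=5 from rfl, show (Int.toNat 6)=6 from rfl, List.getElem_cons_succ, List.getElem_cons_zero] <;> first | omega | (rw [if_neg (by decide)]; omega)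
    · -- level_up
      have h3 : m % 3 = 0 ∨ m % 3 = 1 ∨ m % 3 = 2 := by omega
      rcases h3 with h | h | h <;>
        rw [show ((m:Int)) % 3 = ((m % 3 : Nat) : Int) by omega, h] <;>
        norm_num [PySem.List.pyGetD, show (Int.toNat 0)=0 from rfl, show (Int.toNat 1)=1 from rfl, show (Int.toNat 2)=2 from rfl, show (Int.toNat 3)=3 from rfl, show (Int.toNat 4)=4 from rfl, show (Int.toNat 5)=5 from rfl, show (Int.toNat 6)=6 from rfl, List.getElem_cons_succ, List.getElem_cons_zero] <;> first | omega | (rw [if_neg (by decide)]; omega)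
    · -- samples
      by_cases hlt : m < 3
      · interval_cases m <;> decide
      · rw [if_neg, List.take_of_length_le (by simp [sampleLit]; omega),
            List.take_of_length_le (by simp [sampleLit]; omega)]
        simp [List.length_take, sampleLit]; omega

-- ===== VERDICT (by name: the statement is the Claim_ definition above) =====
theorem process_streams_spec : Claim_equal_process_streams := by
  intro count _
  unfold Spec_process_streams
  by_cases hc : count ≤ 0
  · rw [show process_streams count =
        ([("total", 0), ("high_level", 0), ("treasure", 0), ("level_up", 0)], []) by
      simp [process_streams, PySem.List.pyRange_one_eq_nil hc]]
    simp only [process_streams_alt, max_eq_right hc]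
    decide
  · obtain ⟨m, rfl⟩ : ∃ m : Nat, count = (m : Int) := ⟨count.toNat, by omega⟩
    have hmax : max ((m : Int)) 0 = (m : Int) := by omega
    simp only [process_streams, process_streams_alt, loop_closed, hmax]
    rw [Prod.mk.injEq]
    refine ⟨?_, ?_⟩
    · simp only [PySem.Int.floordiv_eq_ediv_of_pos (by norm_num : (0:Int) < 7),
        PySem.Int.floordiv_eq_ediv_of_pos (by norm_num : (0:Int) < 3),
        PySem.Int.floordiv_eq_ediv_of_pos (by norm_num : (0:Int) < 2),
        PySem.Int.mod_eq_emod_of_pos (by norm_num : (0:Int) < 7)]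
      refine congrArg₂ _ rfl (congrArg₂ _ ?_ (congrArg₂ _ ?_ (congrArg₂ _ ?_ rfl)))
      all_goals simp only [Prod.mk.injEq, true_and]; omega
    · -- samples
      by_cases h3 : m < 3
      · interval_cases m <;> decide
      · have hmin : min ((m : Int)) 3 = 3 := by omega
        rw [List.take_of_length_le (by simp [sampleLit]; omega), hmin]
        decide
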